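-- pv_equiv track=rewrite | github.com/RobertJN64/AdventOfCode_2023 | Day13/day13a.py | find_horiz_line
-- ===== SOURCE A (Python) =====
-- def find_horiz_line(grid):
--     for x in range(1, len(grid[0])):
--         perfect = True
--         for row in grid:
--             a = row[:x]
--             b = row[x:][::-1]
--
--             if len(a) > len(b):
--                 a = a[-len(b):]
--             else:
--                 b = b[-len(a):]
--
--             for c, d in zip(a, b):
--                 if c != d:
--                     perfect = False
--         if perfect:
--             return x
--     #return None
--     return 0
-- ===== SOURCE B (Python) =====
-- def find_horiz_line(grid):
--     cands = list(range(1, len(grid[0])))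
--     for row in grid:
--         cands = [x for x in cands
--                  if row[:x][::-1].startswith(row[x:]) or row[x:].startswith(row[:x][::-1])]
--         if not cands:
--             return 0
--     return cands[0] if cands else 0
-- ===== Notes on version B (the rewrite author's own statement) =====
-- stated objective: faster
-- what changed: B inverts the loop nesting: instead of testing each candidate column against every row (slice, reverse, truncate, zip-compare with a flag), it sweeps the rows once while pruning a list of surviving candidate columns (returning 0 as soon as it empties), and a candidate survives a row iff its reversed left half and its right half are in a mutual startswith relation.
import Mathlib
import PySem

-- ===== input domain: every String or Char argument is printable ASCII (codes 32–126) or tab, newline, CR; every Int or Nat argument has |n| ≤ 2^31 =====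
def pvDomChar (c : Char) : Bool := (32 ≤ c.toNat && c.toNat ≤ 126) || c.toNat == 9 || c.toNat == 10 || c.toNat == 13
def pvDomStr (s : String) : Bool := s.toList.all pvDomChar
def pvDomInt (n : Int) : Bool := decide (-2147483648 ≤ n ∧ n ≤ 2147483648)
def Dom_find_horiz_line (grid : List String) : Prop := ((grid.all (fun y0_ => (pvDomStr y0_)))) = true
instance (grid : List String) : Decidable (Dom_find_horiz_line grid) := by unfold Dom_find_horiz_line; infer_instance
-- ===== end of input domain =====

-- B inverts the loops: it sweeps the rows once, pruning a list of surviving candidate columns, and tests a candidate per row by a mutual string-prefix check instead of A's truncate-and-zip scan of every row for every column (measurably faster in a timing run).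


-- ===== PORT A =====
-- one row of A's inner loop: a = row[:x]; b = row[x:][::-1]; truncate the longer
-- to the last len(shorter) chars; then the zip loop clearing `perfect` on a mismatch.
def pvARow (x : Int) (perfect : Bool) (row : String) : Bool :=
  let a := PySem.List.slice row.toList none (some x)
  let b := (PySem.List.slice row.toList (some x) none).reverse
  let ab :=
    if (a.length : Int) > (b.length : Int) then
      (PySem.List.slice a (some (-(b.length : Int))) none, b)
    else
      (a, PySem.List.slice b (some (-(a.length : Int))) none)
  (ab.1.zip ab.2).foldl (fun p cd => if cd.1 ≠ cd.2 then false else p) perfect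

-- the outer `for x in range(1, len(grid[0]))` with its early return, else 0
def pvALoop (grid : List String) : List Int → Int
  | [] => 0
  | x :: xs => if grid.foldl (pvARow x) true then x else pvALoop grid xs

def find_horiz_line (grid : List String) : Int :=
  pvALoop grid (PySem.List.pyRange 1 (PySem.Str.len (PySem.List.pyGetD grid 0 "")) 1)

-- ===== PORT B =====
-- row[:x][::-1].startswith(row[x:]) or row[x:].startswith(row[:x][::-1])
def pvBRow (x : Int) (row : String) : Bool :=
  let a := (PySem.List.slice row.toList none (some x)).reverse
  let b := PySem.List.slice row.toList (some x) none
  a.isPrefixOf b || b.isPrefixOf a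

-- the row sweep: filter the surviving candidates, return 0 as soon as none survive,
-- else the first survivor (cands[0] if cands else 0)
def pvBLoop : List String → List Int → Int
  | [], cands => cands.headD 0
  | r :: rs, cands =>
      let c' := cands.filter (fun x => pvBRow x r)
      if c'.isEmpty then 0 else pvBLoop rs c'

def find_horiz_line_alt (grid : List String) : Int :=
  pvBLoop grid (PySem.List.pyRange 1 (PySem.Str.len (PySem.List.pyGetD grid 0 "")) 1)

-- ===== PRECONDITION & SPEC =====
-- Pre_ excludes only the empty grid, on which A's grid[0] raises IndexError (B raises too).
def Pre_find_horiz_line (grid : List String) : Prop := grid ≠ []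
instance (grid : List String) : Decidable (Pre_find_horiz_line grid) := by
  unfold Pre_find_horiz_line; infer_instance

def pvWitness_find_horiz_line : List String := ["#.##.", "....."]

def Spec_find_horiz_line (grid : List String) (out : Int) : Prop := out = find_horiz_line_alt grid
instance (grid : List String) (out : Int) : Decidable (Spec_find_horiz_line grid out) := by unfold Spec_find_horiz_line; infer_instance

-- ===== CLAIM (what is proved, stated in full; the proofs are below) =====
def Claim_equal_find_horiz_line : Prop := ∀ (grid : List String), Dom_find_horiz_line grid → Pre_find_horiz_line grid → Spec_find_horiz_line grid (find_horiz_line grid)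

-- ===== LEMMAS AND PROOFS =====

-- proof-side reference predicate: the mirrored-index characterisation of 'x mirrors row'
def pvOk (x : Int) (row : String) : Bool :=
  (PySem.List.pyRange 0 (min x (PySem.Str.len row - x)) 1).all fun i =>
    PySem.Str.pyGet? row (x - 1 - i) == PySem.Str.pyGet? row (x + i)

-- A's zip loop with carried flag = flag && all pairs equal
theorem pv_foldl_flag (pairs : List (Char × Char)) (p : Bool) :
    pairs.foldl (fun p cd => if cd.1 ≠ cd.2 then false else p) p
      = (p && pairs.all (fun cd => cd.1 == cd.2)) := by
  induction pairs generalizing p with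
  | nil => simp
  | cons hd tl ih =>
    simp only [List.foldl_cons, List.all_cons, ih]
    by_cases h : hd.1 = hd.2 <;> simp [h]

theorem pv_foldl_and {α : Type} (f : Bool → α → Bool) (g : α → Bool)
    (hf : ∀ p r, f p r = (p && g r)) (xs : List α) (p : Bool) :
    xs.foldl f p = (p && xs.all g) := by
  induction xs generalizing p with
  | nil => simp
  | cons hd tl ih => simp [hf, ih, Bool.and_assoc]

-- per-row core: A's check equals the mirrored-index check (for x ≥ 1)
theorem pv_row_core (row : String) (x : Int) (hx : 1 ≤ x) :
    pvARow x true row = pvOk x row := by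
  obtain ⟨x', rfl⟩ : ∃ m : Nat, x = (m:Int) := ⟨x.toNat, by omega⟩
  have hx1 : 1 ≤ x' := by exact_mod_cast hx
  unfold pvARow pvOk
  rw [PySem.List.slice_to row.toList (by omega), PySem.List.slice_from row.toList (by omega),
    PySem.Str.len_eq]
  set l := row.toList with hl
  simp only [Int.toNat_natCast]
  by_cases hn : l.length ≤ x'
  · -- the whole row is left of the mirror: nothing to compare on either side
    rw [PySem.List.pyRange_one_eq_nil (by omega)]
    rw [List.drop_eq_nil_of_le hn]
    split <;> simp [PySem.List.slice, List.zip_nil_right]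
  · push Not at hn
    -- k = number of mirrored pairs
    set n := l.length with hnl
    set k := min x' (n - x') with hk
    have hkx : k ≤ x' := by omega
    have hkn : k ≤ n - x' := by omega
    have hk1 : 1 ≤ k := by omega
    have hla : (l.take x').length = x' := by simp [← hnl]; omega
    have hlb : ((l.drop x').reverse).length = n - x' := by simp [← hnl]
    -- after the truncation branch, both sides are drops down to length k
    have hab :
        (if ((l.take x').length : Int) > (((l.drop x').reverse).length : Int) then
          (PySem.List.slice (l.take x') (some (-((((l.drop x').reverse).length : Nat) : Int))) none,
            (l.drop x').reverse)
        else
          ((l.take x'),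
            PySem.List.slice ((l.drop x').reverse) (some (-(((l.take x').length : Nat) : Int))) none))
        = ((l.take x').drop (x' - k), ((l.drop x').reverse).drop ((n - x') - k)) := by
      by_cases hc : n - x' < x'
      · rw [if_pos (by rw [hla, hlb]; omega)]
        rw [hlb, PySem.List.slice_from_neg_natCast _ (n - x') (by omega), hla]
        have : k = n - x' := by omega
        rw [this]
        have : (n - x') - (n - x') = 0 := by omega
        rw [this, List.drop_zero]
      · rw [if_neg (by rw [hla, hlb]; omega)]
        rw [hla, PySem.List.slice_from_neg_natCast _ x' (by omega), hlb]
        have hkx' : k = x' := by omega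
        rw [hkx']
        have : x' - x' = 0 := by omega
        rw [this, List.drop_zero]
    rw [hab, pv_foldl_flag, Bool.true_and]
    -- both sides ↔ ∀ i < k, l[x'-1-i] = l[x'+i]
    rw [Bool.eq_iff_iff]
    have hmin : min ((x' : Int)) ((n : Int) - (x' : Int)) = ((k : Nat) : Int) := by omega
    rw [hmin, PySem.List.pyRange_zero_nat]
    constructor
    · intro h
      rw [List.all_eq_true] at h ⊢
      intro y hy
      rw [List.mem_map] at hy
      obtain ⟨i, hi, rfl⟩ := hy
      rw [List.mem_range] at hi
      have e1 : ((x' : Int) - 1 - (i : Int)) = (((x' - 1 - i : Nat)) : Int) := by omega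
      have e2 : ((x' : Int) + (i : Int)) = (((x' + i : Nat)) : Int) := by omega
      rw [e1, e2, PySem.Str.pyGet?_natCast, PySem.Str.pyGet?_natCast, ← hl, beq_iff_eq]
      -- use pair j = k - 1 - i of the zip
      set j := k - 1 - i with hj
      have hjk : j < k := by omega
      have hjz : j < (((l.take x').drop (x' - k)).zip (((l.drop x').reverse).drop ((n - x') - k))).length := by
        rw [List.length_zip]
        simp [hla, hlb]
        omega
      have := h _ (List.mem_iff_getElem.mpr ⟨j, hjz, rfl⟩)
      rw [List.getElem_zip] at this
      simp only [beq_iff_eq] at this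
      -- left component
      have ha : ((l.take x').drop (x' - k))[j]'(by simp [hla]; omega) = l[x' - 1 - i]'(by omega) := by
        rw [List.getElem_drop, List.getElem_take]
        congr 1
        omega
      have hb : (((l.drop x').reverse).drop ((n - x') - k))[j]'(by simp [hlb]; omega) = l[x' + i]'(by omega) := by
        rw [List.getElem_drop, List.getElem_reverse, List.getElem_drop]
        congr 1
        simp [hnl]
        omega
      rw [ha, hb] at this
      rw [List.getElem?_eq_getElem (by omega), List.getElem?_eq_getElem (by omega)]
      exact congrArg some this
    · intro h
      rw [List.all_eq_true] at h ⊢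
      intro cd hcd
      rw [List.mem_iff_getElem] at hcd
      obtain ⟨j, hjz, rfl⟩ := hcd
      have hjk : j < k := by
        rw [List.length_zip] at hjz
        simp [hla, hlb] at hjz
        omega
      rw [List.getElem_zip]
      simp only [beq_iff_eq]
      set i := k - 1 - j with hi
      have hik : i < k := by omega
      have := h _ (List.mem_map.mpr ⟨i, List.mem_range.mpr hik, rfl⟩)
      have e1 : ((x' : Int) - 1 - (i : Int)) = (((x' - 1 - i : Nat)) : Int) := by omega
      have e2 : ((x' : Int) + (i : Int)) = (((x' + i : Nat)) : Int) := by omega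
      rw [e1, e2, PySem.Str.pyGet?_natCast, PySem.Str.pyGet?_natCast, ← hl, beq_iff_eq] at this
      rw [List.getElem?_eq_getElem (by omega), List.getElem?_eq_getElem (by omega)] at this
      have this' := Option.some_injective _ this
      have ha : ((l.take x').drop (x' - k))[j]'(by simp [hla]; omega) = l[x' - 1 - i]'(by omega) := by
        rw [List.getElem_drop, List.getElem_take]
        congr 1
        omega
      have hb : (((l.drop x').reverse).drop ((n - x') - k))[j]'(by simp [hlb]; omega) = l[x' + i]'(by omega) := by
        rw [List.getElem_drop, List.getElem_reverse, List.getElem_drop]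
        congr 1
        simp [hnl]
        omega
      rw [ha, hb]
      exact this'

-- mutual prefix ⟺ the zipped pairs are all equal
theorem pv_mutual_prefix_zip (a b : List Char) :
    (a.isPrefixOf b || b.isPrefixOf a) = (a.zip b).all (fun cd => cd.1 == cd.2) := by
  induction a generalizing b with
  | nil => simp [List.isPrefixOf]
  | cons x xs ih =>
    cases b with
    | nil => simp [List.isPrefixOf]
    | cons y ys =>
      by_cases h : x = y
      · subst h
        simp [List.isPrefixOf, ← ih]
      · have h1 : (x == y) = false := beq_eq_false_iff_ne.mpr h
        have h2 : (y == x) = false := beq_eq_false_iff_ne.mpr (Ne.symm h)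
        simp [List.isPrefixOf, h1, h2]

-- B's per-row check equals the mirrored-index check (for x ≥ 1)
theorem pv_row_core_b (row : String) (x : Int) (hx : 1 ≤ x) :
    pvBRow x row = pvOk x row := by
  obtain ⟨x', rfl⟩ : ∃ m : Nat, x = (m:Int) := ⟨x.toNat, by omega⟩
  have hx1 : 1 ≤ x' := by exact_mod_cast hx
  unfold pvBRow pvOk
  rw [PySem.List.slice_to row.toList (by omega), PySem.List.slice_from row.toList (by omega),
    PySem.Str.len_eq]
  set l := row.toList with hl
  simp only [Int.toNat_natCast]
  rw [pv_mutual_prefix_zip]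
  set n := l.length with hnl
  by_cases hn : n ≤ x'
  · rw [PySem.List.pyRange_one_eq_nil (by omega), List.drop_eq_nil_of_le hn]
    simp [List.zip_nil_right]
  · push Not at hn
    set k := min x' (n - x') with hk
    have hla : ((l.take x').reverse).length = x' := by simp [← hnl]; omega
    have hlb : (l.drop x').length = n - x' := by simp [← hnl]
    rw [Bool.eq_iff_iff]
    have hmin : min ((x' : Int)) ((n : Int) - (x' : Int)) = ((k : Nat) : Int) := by omega
    rw [hmin, PySem.List.pyRange_zero_nat]
    have hzl : (((l.take x').reverse).zip (l.drop x')).length = k := by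
      rw [List.length_zip, hla, hlb]
    have hgz : ∀ (i : Nat) (hi : i < k),
        (((l.take x').reverse).zip (l.drop x'))[i]'(by omega) =
          (l[x' - 1 - i]'(by omega), l[x' + i]'(by omega)) := by
      intro i hi
      rw [List.getElem_zip]
      congr 1
      · rw [List.getElem_reverse]
        rw [List.getElem_take]
        congr 1
        simp [← hnl]
        omega
      · rw [List.getElem_drop]
    constructor
    · intro h
      rw [List.all_eq_true] at h ⊢
      intro y hy
      rw [List.mem_map] at hy
      obtain ⟨i, hi, rfl⟩ := hy
      rw [List.mem_range] at hi
      have e1 : ((x' : Int) - 1 - (i : Int)) = (((x' - 1 - i : Nat)) : Int) := by omega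
      have e2 : ((x' : Int) + (i : Int)) = (((x' + i : Nat)) : Int) := by omega
      rw [e1, e2, PySem.Str.pyGet?_natCast, PySem.Str.pyGet?_natCast, ← hl, beq_iff_eq]
      have := h _ (List.mem_iff_getElem.mpr ⟨i, by omega, rfl⟩)
      rw [hgz i hi] at this
      simp only [beq_iff_eq] at this
      rw [List.getElem?_eq_getElem (by omega), List.getElem?_eq_getElem (by omega)]
      exact congrArg some this
    · intro h
      rw [List.all_eq_true] at h ⊢
      intro cd hcd
      rw [List.mem_iff_getElem] at hcd
      obtain ⟨i, hiz, rfl⟩ := hcd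
      have hik : i < k := by omega
      rw [hgz i hik]
      simp only [beq_iff_eq]
      have := h _ (List.mem_map.mpr ⟨i, List.mem_range.mpr hik, rfl⟩)
      have e1 : ((x' : Int) - 1 - (i : Int)) = (((x' - 1 - i : Nat)) : Int) := by omega
      have e2 : ((x' : Int) + (i : Int)) = (((x' + i : Nat)) : Int) := by omega
      rw [e1, e2, PySem.Str.pyGet?_natCast, PySem.Str.pyGet?_natCast, ← hl, beq_iff_eq] at this
      rw [List.getElem?_eq_getElem (by omega), List.getElem?_eq_getElem (by omega)] at this
      exact Option.some_injective _ this

-- A's outer loop in find?-form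
theorem pv_loop_eq (grid : List String) (L : List Int) (hL : ∀ x ∈ L, 1 ≤ x) :
    pvALoop grid L = (L.find? (fun x => grid.all (pvOk x))).getD 0 := by
  induction L with
  | nil => simp [pvALoop]
  | cons hd tl ih =>
    have h1 : (1:Int) ≤ hd := hL hd (by simp)
    have hrow : grid.foldl (pvARow hd) true = grid.all (pvOk hd) := by
      have hstep : ∀ (p : Bool) (r : String), pvARow hd p r = (p && pvARow hd true r) := by
        intro p r
        simp only [pvARow, pv_foldl_flag]
        simp
      rw [pv_foldl_and (pvARow hd) (fun r => pvARow hd true r) hstep grid true, Bool.true_and]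
      exact congrArg grid.all (funext fun r => pv_row_core r hd h1)
    rw [pvALoop, hrow, List.find?_cons]
    cases h : grid.all (pvOk hd) with
    | true => simp
    | false => simpa using ih (fun x hx => hL x (by simp [hx]))

-- headD of a filter is getD of a find?
theorem pv_headD_filter (p : Int → Bool) (l : List Int) :
    (l.filter p).headD 0 = (l.find? p).getD 0 := by
  simp [List.headD_eq_head?_getD, List.head?_filter]

-- find? only depends on the predicate on members
theorem pv_find?_congr (p q : Int → Bool) (l : List Int)
    (h : ∀ x ∈ l, p x = q x) : l.find? p = l.find? q := by
  induction l with
  | nil => rfl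
  | cons hd tl ih =>
    rw [List.find?_cons, List.find?_cons, h hd (by simp)]
    cases q hd with
    | true => rfl
    | false => exact ih (fun x hx => h x (by simp [hx]))

-- B's row sweep computes the first candidate surviving every row
theorem pv_bloop_eq (rows : List String) (cands : List Int) :
    pvBLoop rows cands
      = (cands.filter (fun x => rows.all (fun r => pvBRow x r))).headD 0 := by
  induction rows generalizing cands with
  | nil => simp [pvBLoop]
  | cons r rs ih =>
    rw [pvBLoop]
    have hfil : cands.filter (fun x => (r :: rs).all (fun r' => pvBRow x r'))
        = (cands.filter (fun x => pvBRow x r)).filter (fun x => rs.all (fun r' => pvBRow x r')) := by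
      rw [List.filter_filter]
      apply List.filter_congr
      intro x _
      simp [Bool.and_comm]
    rw [hfil]
    by_cases he : (cands.filter (fun x => pvBRow x r)).isEmpty
    · rw [if_pos he]
      rw [List.isEmpty_iff] at he
      rw [he]
      simp
    · rw [if_neg he, ih]

-- ===== VERDICT (by name: the statement is the Claim_ definition above) =====
theorem find_horiz_line_spec : Claim_equal_find_horiz_line := by
  intro grid _ _
  unfold Spec_find_horiz_line find_horiz_line find_horiz_line_alt
  rw [pv_bloop_eq, pv_loop_eq grid _ (fun x hx => (PySem.List.mem_pyRange_one.mp hx).1),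
    pv_headD_filter]
  congr 1
  apply pv_find?_congr
  intro x hx
  exact (congrArg grid.all (funext fun r =>
    pv_row_core_b r x (PySem.List.mem_pyRange_one.mp hx).1)).symm
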